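-- pv_equiv track=rewrite | github.com/MohiuddinSohel/Leetcoding | amazonOAPreparation/OA.py | exceeding_threshold_amazon_sales
-- ===== SOURCE A (Python) =====
-- def exceeding_threshold_amazon_sales(arr, k, threshold):
--     if len(arr) < k:
--         return 0
--     arr.sort(reverse = True)
--     count = left = c_sum = 0
--     for right, a in enumerate(arr):
--         c_sum += a
--         if right - left + 1 == k:
--             if c_sum <= threshold:
--                 return count
--             elif c_sum > threshold:
--                 count += 1
--                 c_sum -= arr[left]
--                 left += 1
--     return count
-- ===== SOURCE B (Python) =====
-- def exceeding_threshold_amazon_sales(arr, k, threshold):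
--     if len(arr) < k:
--         return 0
--     arr.sort(reverse=True)
--     if k <= 0:
--         return 0
--     pre = [0]
--     for a in arr:
--         pre.append(pre[-1] + a)
--     return sum(1 for i in range(len(arr) - k + 1) if pre[i + k] - pre[i] > threshold)
-- ===== Notes on version B (the rewrite author's own statement) =====
-- stated objective: alternative
-- what changed: Replaces the sliding-window left-pointer loop with an early return by a prefix-sum table and a direct count over all window start indices (correct because on the descending-sorted array window sums are non-increasing, so the windows exceeding the threshold form exactly the prefix A counts).
import Mathlib
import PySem

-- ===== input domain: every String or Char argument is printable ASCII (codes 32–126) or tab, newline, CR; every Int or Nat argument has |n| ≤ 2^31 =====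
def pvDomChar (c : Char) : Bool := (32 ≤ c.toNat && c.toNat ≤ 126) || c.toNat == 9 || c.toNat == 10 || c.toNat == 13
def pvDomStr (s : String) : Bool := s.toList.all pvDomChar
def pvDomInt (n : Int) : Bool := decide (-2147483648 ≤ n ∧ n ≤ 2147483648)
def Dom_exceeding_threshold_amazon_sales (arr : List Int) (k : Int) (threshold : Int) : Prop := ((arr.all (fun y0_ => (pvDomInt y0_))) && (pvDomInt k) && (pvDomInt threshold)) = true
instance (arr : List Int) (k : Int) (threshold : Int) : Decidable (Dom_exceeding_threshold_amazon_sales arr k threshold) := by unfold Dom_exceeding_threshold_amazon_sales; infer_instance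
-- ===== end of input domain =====

-- B replaces A's sliding-window loop (running sum, left pointer, early return) by a prefix-sum
-- table and a direct count over all window starts; objective: alternative (same cost).
-- A sorts arr in place (when len(arr) >= k); B performs the same mutation; the theorems are about the return value.

-- ===== PORT A =====
-- A's for-loop over enumerate(arr) with its early 'return count': structural recursion over the
-- remaining suffix, carrying right/count/left/c_sum exactly as in the Python.
def pvALoop (s : List Int) (k threshold : Int) : List Int → Int → Int → Int → Int → Int
  | [], _, count, _, _ => count
  | a :: rest, right, count, left, c_sum =>
      let c := c_sum + a
      if right - left + 1 = k then
        if c ≤ threshold then count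
        else if c > threshold then
          -- arr[left]: left is a nonnegative in-range index whenever this line runs
          pvALoop s k threshold rest (right + 1) (count + 1) (left + 1) (c - PySem.List.pyGetD s left 0)
        else pvALoop s k threshold rest (right + 1) count left c
      else pvALoop s k threshold rest (right + 1) count left c

def exceeding_threshold_amazon_sales (arr : List Int) (k : Int) (threshold : Int) : Int :=
  if (arr.length : Int) < k then 0
  else
    let s := PySem.List.sorted arr (fun x => x) true
    pvALoop s k threshold s 0 0 0 0

-- ===== PORT B =====
def exceeding_threshold_amazon_sales_alt (arr : List Int) (k : Int) (threshold : Int) : Int :=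
  if (arr.length : Int) < k then 0
  else
    let s := PySem.List.sorted arr (fun x => x) true
    if k ≤ 0 then 0
    else
      let pre := s.foldl (fun pre a => pre ++ [PySem.List.pyGetD pre (-1) 0 + a]) [0]
      (PySem.List.pyRange 0 ((s.length : Int) - k + 1) 1).foldl
        (fun acc i => if PySem.List.pyGetD pre (i + k) 0 - PySem.List.pyGetD pre i 0 > threshold then acc + 1 else acc) 0

-- ===== PRECONDITION & SPEC =====
def Spec_exceeding_threshold_amazon_sales (arr : List Int) (k : Int) (threshold : Int) (out : Int) : Prop := out = exceeding_threshold_amazon_sales_alt arr k threshold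
instance (arr : List Int) (k : Int) (threshold : Int) (out : Int) : Decidable (Spec_exceeding_threshold_amazon_sales arr k threshold out) := by unfold Spec_exceeding_threshold_amazon_sales; infer_instance

-- ===== CLAIM (what is proved, stated in full; the proofs are below) =====
def Claim_equal_exceeding_threshold_amazon_sales : Prop := ∀ (arr : List Int) (k : Int) (threshold : Int), Dom_exceeding_threshold_amazon_sales arr k threshold → Spec_exceeding_threshold_amazon_sales arr k threshold (exceeding_threshold_amazon_sales arr k threshold)

-- ===== LEMMAS AND PROOFS =====

-- takewhile-style count of leading size-K windows with sum > thr (proof-side bridge)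
def pvCtW (thr : Int) (K : ℕ) : List Int → Int
  | [] => 0
  | a :: rest =>
      if K ≤ (a :: rest).length ∧ thr < ((a :: rest).take K).sum then 1 + pvCtW thr K rest else 0

-- A's loop never completes a window when k ≤ 0
theorem pvALoop_nonpos (s : List Int) (k thr : Int) (hk : k ≤ 0) :
    ∀ (t : List Int) (j c l cs : Int), l ≤ j → pvALoop s k thr t j c l cs = c := by
  intro t
  induction t with
  | nil => intro j c l cs h; rfl
  | cons a rest ih =>
      intro j c l cs h
      have hne : ¬ (j - l + 1 = k) := by omega
      simp only [pvALoop, hne, if_false]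
      exact ih (j + 1) c l (cs + a) (by omega)

-- A's loop, started with invariant state, computes count + takewhile count from position l
theorem pvALoop_spec (s : List Int) (k thr : Int) (K : ℕ) (hkK : k = (K : Int)) (hK : 1 ≤ K) :
    ∀ (t : List Int) (l g : ℕ) (c : Int),
      t = s.drop (l + g) → g < K →
      pvALoop s k thr t ((l : Int) + g) c l (((s.drop l).take g).sum) =
        c + pvCtW thr K (s.drop l) := by
  intro t
  induction t with
  | nil =>
      intro l g c ht hg
      have hlen : s.length ≤ l + g := by
        have := congrArg List.length ht; simp at this; omega
      have hlt : (s.drop l).length < K := by simp; omega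
      have : pvCtW thr K (s.drop l) = 0 := by
        cases h : s.drop l with
        | nil => rfl
        | cons x xs =>
            have : (x :: xs).length = (s.drop l).length := by rw [h]
            simp only [pvCtW]
            rw [if_neg]; intro ⟨h1, _⟩; omega
      rw [this]; simp [pvALoop]
  | cons a rest ih =>
      intro l g c ht hg
      have hlen : l + g < s.length := by
        have := congrArg List.length ht; simp at this; omega
      have ha : a = s[l + g] := by
        have := congrArg (fun u => u[0]?) ht
        simp [List.getElem?_drop] at this
        simp [List.getElem?_eq_getElem hlen] at this
        exact this
      have hrest : rest = s.drop (l + g + 1) := by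
        have := congrArg List.tail ht
        simpa [List.tail_drop] using this
      have hsum1 : ((s.drop l).take g).sum + a = ((s.drop l).take (g + 1)).sum := by
        rw [List.take_succ]
        have : (s.drop l)[g]? = some s[l + g] := by
          rw [List.getElem?_drop]; exact List.getElem?_eq_getElem hlen
        rw [this]; simp [ha]
      by_cases hwin : g + 1 = K
      · -- window completes
        subst hwin
        have hcond : (l : Int) + g - l + 1 = k := by omega
        simp only [pvALoop, hsum1]
        rw [if_pos hcond]
        have hKlen : g + 1 ≤ (s.drop l).length := by simp; omega
        have hdl : s.drop l ≠ [] := by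
          intro h; have := congrArg List.length h; simp at this; omega
        obtain ⟨x, xs, hxx⟩ := List.exists_cons_of_ne_nil hdl
        by_cases hle : ((s.drop l).take (g + 1)).sum ≤ thr
        · rw [if_pos hle]
          have : pvCtW thr (g + 1) (s.drop l) = 0 := by
            rw [hxx]; simp only [pvCtW]
            rw [if_neg]; intro ⟨_, h2⟩
            rw [← hxx] at h2; omega
          rw [this]; ring
        · rw [if_neg hle, if_pos (by omega : ((s.drop l).take (g + 1)).sum > thr)]
          have hlo : l < s.length := by omega
          have hgetl : PySem.List.pyGetD s (l : Int) 0 = s[l] := by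
            rw [PySem.List.pyGetD_natCast]; exact List.getD_eq_getElem s 0 hlo
          have hdropl : s.drop l = s[l] :: s.drop (l + 1) := by
            rw [List.drop_eq_getElem_cons hlo]
          have hsub : ((s.drop l).take (g + 1)).sum - s[l] = ((s.drop (l + 1)).take g).sum := by
            rw [hdropl, List.take_succ_cons]; simp
          rw [hgetl]
          have harg : ((l : Int) + g + 1) = ((l + 1 : ℕ) : Int) + (g : ℕ) := by push_cast; ring
          have hrest' : rest = s.drop ((l + 1) + g) := by rw [hrest]; ring_nf
          rw [hsub, harg, show ((l : Int) + 1) = ((l + 1 : ℕ) : Int) by push_cast; ring]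
          rw [ih (l + 1) g (c + 1) hrest' (by omega)]
          have : pvCtW thr (g + 1) (s.drop l) = 1 + pvCtW thr (g + 1) (s.drop (l + 1)) := by
            rw [hxx]; simp only [pvCtW]
            rw [if_pos]
            · congr 1
              have := congrArg List.tail hxx
              simp [List.tail_drop] at this
              rw [← this]
            · rw [← hxx]
              exact ⟨hKlen, by omega⟩
          rw [this]; ring
      · -- window not yet complete
        have hcond : ¬ ((l : Int) + g - l + 1 = k) := by omega
        simp only [pvALoop, hsum1]
        rw [if_neg hcond]
        have harg : ((l : Int) + g + 1) = ((l : ℕ) : Int) + ((g + 1 : ℕ) : Int) := by push_cast; ring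
        rw [harg]
        exact ih l (g + 1) c (by rw [hrest]; ring_nf) (by omega)

-- window sums over a descending list are antitone (one step)
theorem pvWin_step (t : List Int) (hp : t.Pairwise (fun a b => b ≤ a)) (K i : ℕ)
    (h : i + 1 + K ≤ t.length) :
    ((t.drop (i + 1)).take K).sum ≤ ((t.drop i).take K).sum := by
  rcases Nat.eq_zero_or_pos K with h0 | hKpos
  · simp [h0]
  obtain ⟨M, rfl⟩ : ∃ M, K = M + 1 := ⟨K - 1, by omega⟩
  have hi : i < t.length := by omega
  have hik : i + (M + 1) < t.length := by omega
  have hdi : t.drop i = t[i] :: t.drop (i + 1) := List.drop_eq_getElem_cons hi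
  have htake : (t.drop (i + 1)).take (M + 1) = (t.drop (i + 1)).take M ++ [t[i + (M + 1)]] := by
    rw [List.take_succ]
    have : (t.drop (i + 1))[M]? = some t[i + (M + 1)] := by
      rw [List.getElem?_drop]
      have : i + 1 + M = i + (M + 1) := by omega
      rw [this]; exact List.getElem?_eq_getElem hik
    rw [this]; simp
  have hle : t[i + (M + 1)] ≤ t[i] := by
    rw [List.pairwise_iff_getElem] at hp
    exact hp i (i + (M + 1)) hi hik (by omega)
  rw [hdi, List.take_succ_cons, htake]
  simp; omega

-- hence every window sum is at most window 0's sum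
theorem pvWin_le_zero (t : List Int) (hp : t.Pairwise (fun a b => b ≤ a)) (K : ℕ) :
    ∀ i, i + K ≤ t.length → ((t.drop i).take K).sum ≤ (t.take K).sum := by
  intro i
  induction i with
  | zero => intro _; simp
  | succ m ih =>
      intro h
      calc ((t.drop (m + 1)).take K).sum ≤ ((t.drop m).take K).sum := pvWin_step t hp K m h
        _ ≤ (t.take K).sum := ih (by omega)

-- takewhile count = full count on a descending list
theorem pvCtW_eq_countP (thr : Int) (K : ℕ) (hK : 1 ≤ K) :
    ∀ (t : List Int), t.Pairwise (fun a b => b ≤ a) →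
      pvCtW thr K t =
        ((List.range (t.length + 1 - K)).countP
          (fun i => decide (thr < ((t.drop i).take K).sum)) : ℕ) := by
  intro t
  induction t with
  | nil =>
      intro _
      simp [pvCtW, Nat.sub_eq_zero_of_le hK]
  | cons a rest ih =>
      intro hp
      by_cases hc : K ≤ (a :: rest).length ∧ thr < ((a :: rest).take K).sum
      · simp only [pvCtW, if_pos hc]
        have hm : (a :: rest).length + 1 - K = (rest.length + 1 - K) + 1 := by
          simp at hc ⊢; omega
        rw [hm, List.range_succ_eq_map, List.countP_cons, List.countP_map]
        have h0 : decide (thr < (((a :: rest).drop 0).take K).sum) = true := by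
          simp; exact hc.2
        rw [ih hp.tail]
        simp only [h0]
        have hfun : ((fun i => decide (thr < (((a :: rest).drop i).take K).sum)) ∘ (fun i => i + 1)) =
            (fun i => decide (thr < ((rest.drop i).take K).sum)) := by
          funext i; simp
        rw [hfun]
        push_cast; ring
      · simp only [pvCtW, if_neg hc]
        rcases Nat.lt_or_ge (a :: rest).length K with hlt | hge
        · have : (a :: rest).length + 1 - K = 0 := by omega
          rw [this]; simp
        · have hfail : ¬ thr < ((a :: rest).take K).sum := fun h => hc ⟨hge, h⟩
          have hall : ∀ i ∈ List.range ((a :: rest).length + 1 - K),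
              ¬ (decide (thr < (((a :: rest).drop i).take K).sum) = true) := by
            intro i hi
            simp only [List.mem_range] at hi
            have hb : i + K ≤ (a :: rest).length := by omega
            have := pvWin_le_zero (a :: rest) hp K i hb
            simp only [decide_eq_true_eq]
            simp at this ⊢
            omega
          rw [List.countP_eq_zero.mpr hall]
          simp
-- the prefix-sum list B builds is the table of prefix sums
theorem pvPre_eq (s : List Int) :
    s.foldl (fun pre a => pre ++ [PySem.List.pyGetD pre (-1) 0 + a]) [0] =
      (List.range (s.length + 1)).map (fun i => (s.take i).sum) := by
  induction s using List.reverseRecOn with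
  | nil => simp
  | append_singleton s x ih =>
      rw [List.foldl_append, List.foldl_cons, List.foldl_nil, ih]
      have hlast : PySem.List.pyGetD ((List.range (s.length + 1)).map (fun i => (s.take i).sum)) (-1) 0 = s.sum := by
        rw [List.range_succ, List.map_append]
        simp [PySem.List.pyGetD_neg_one_append_singleton]
      rw [hlast]
      have hr : List.range ((s ++ [x]).length + 1) = List.range (s.length + 1) ++ [s.length + 1] := by
        simp [List.range_succ]
      rw [hr, List.map_append]
      congr 1
      · apply List.map_congr_left
        intro i hi
        simp only [List.mem_range] at hi
        rw [List.take_append_of_le_length (by omega)]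
      · have : (s ++ [x]).take (s.length + 1) = s ++ [x] := List.take_of_length_le (by simp)
        simp [this]

-- a 0/1-counting foldl is countP
theorem pvFoldl_count (p : ℕ → Bool) :
    ∀ (l : List ℕ) (init : Int),
      l.foldl (fun acc j => if p j then acc + 1 else acc) init = init + (l.countP p : ℕ) := by
  intro l
  induction l with
  | nil => intro init; simp
  | cons a rest ih =>
      intro init
      simp only [List.foldl_cons, List.countP_cons]
      by_cases h : p a = true
      · rw [if_pos h, ih]; simp [h]; ring
      · rw [if_neg h, ih]; simp [h]

-- B's port computes the full window count
theorem pvB_count (s : List Int) (k thr : Int) (K : ℕ) (hkK : k = (K : Int)) (hK : 1 ≤ K)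
    (hKn : K ≤ s.length) :
    (PySem.List.pyRange 0 ((s.length : Int) - k + 1) 1).foldl
        (fun acc i => if PySem.List.pyGetD (s.foldl (fun pre a => pre ++ [PySem.List.pyGetD pre (-1) 0 + a]) [0]) (i + k) 0
          - PySem.List.pyGetD (s.foldl (fun pre a => pre ++ [PySem.List.pyGetD pre (-1) 0 + a]) [0]) i 0 > thr then acc + 1 else acc) (0 : Int) =
      (((List.range (s.length + 1 - K)).countP
          (fun i => decide (thr < ((s.drop i).take K).sum)) : ℕ) : Int) := by
  rw [pvPre_eq]
  have hto : ((s.length : Int) - k + 1 - 0).toNat = s.length + 1 - K := by rw [hkK]; omega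
  rw [PySem.List.pyRange_one, hto, List.foldl_map]
  have hget : ∀ i : ℕ, i < s.length + 1 →
      PySem.List.pyGetD ((List.range (s.length + 1)).map (fun i => (s.take i).sum)) (i : Int) 0 = (s.take i).sum := by
    intro i hi
    rw [PySem.List.pyGetD_natCast]
    rw [List.getD_eq_getElem _ 0 (by simpa using hi)]
    simp
  have hbody : ∀ (acc : Int), ∀ j ∈ List.range (s.length + 1 - K),
      (if PySem.List.pyGetD ((List.range (s.length + 1)).map (fun i => (s.take i).sum)) ((0 : Int) + (j : Int) + k) 0
          - PySem.List.pyGetD ((List.range (s.length + 1)).map (fun i => (s.take i).sum)) ((0 : Int) + (j : Int)) 0 > thr then acc + 1 else acc) =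
      (if (fun j => decide (thr < ((s.drop j).take K).sum)) j then acc + 1 else acc) := by
    intro acc j hj
    simp only [List.mem_range] at hj
    have h1 : (0 : Int) + (j : Int) + k = ((j + K : ℕ) : Int) := by rw [hkK]; push_cast; ring_nf
    have h2 : (0 : Int) + (j : Int) = ((j : ℕ) : Int) := by ring
    rw [h1, h2, hget (j + K) (by omega), hget j (by omega)]
    have hdiff : (s.take (j + K)).sum - (s.take j).sum = ((s.drop j).take K).sum := by
      rw [List.take_add, List.sum_append]; ring
    rw [hdiff]
    by_cases h : thr < ((s.drop j).take K).sum
    · simp [h]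
    · simp [h]
  have hcongr := PySem.List.foldl_congr_mem (List.range (s.length + 1 - K))
      (fun acc j => if PySem.List.pyGetD ((List.range (s.length + 1)).map (fun i => (s.take i).sum)) ((0 : Int) + (j : Int) + k) 0
          - PySem.List.pyGetD ((List.range (s.length + 1)).map (fun i => (s.take i).sum)) ((0 : Int) + (j : Int)) 0 > thr then acc + 1 else acc)
      (fun acc j => if decide (thr < ((s.drop j).take K).sum) then acc + 1 else acc) 0 hbody
  refine hcongr.trans ?_
  refine (pvFoldl_count (fun j => decide (thr < ((s.drop j).take K).sum)) (List.range (s.length + 1 - K)) 0).trans ?_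
  simp

-- ===== VERDICT (by name: the statement is the Claim_ definition above) =====
theorem exceeding_threshold_amazon_sales_spec : Claim_equal_exceeding_threshold_amazon_sales := by
  intro arr k thr _
  unfold Spec_exceeding_threshold_amazon_sales
  unfold exceeding_threshold_amazon_sales exceeding_threshold_amazon_sales_alt
  by_cases hlen : (arr.length : Int) < k
  · simp [hlen]
  · simp only [if_neg hlen]
    set s := PySem.List.sorted arr (fun x => x) true with hs
    by_cases hk0 : k ≤ 0
    · rw [if_pos hk0]
      exact pvALoop_nonpos s k thr hk0 s 0 0 0 0 (le_refl 0)
    · rw [if_neg hk0]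
      have hk1 : 1 ≤ k := by omega
      set K := k.toNat with hK
      have hkK : k = (K : Int) := by omega
      have hKge : 1 ≤ K := by omega
      have hslen : s.length = arr.length := PySem.List.length_sorted arr _ true
      have hKn : K ≤ s.length := by omega
      have hA : pvALoop s k thr s 0 0 0 0 = 0 + pvCtW thr K s := by
        have := pvALoop_spec s k thr K hkK hKge s 0 0 0 (by simp) (by omega)
        simpa using this
      rw [hA]
      have hp : s.Pairwise (fun a b => b ≤ a) := PySem.List.sorted_pairwise_rev arr (fun x => x)
      rw [pvCtW_eq_countP thr K hKge s hp]
      rw [pvB_count s k thr K hkK hKge hKn]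
      simp
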